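-- pv_equiv track=rewrite | github.com/rtfm-si/bo1 | bo1/prompts/mentor.py | format_active_actions
-- ===== SOURCE A (Python) =====
-- from typing import TYPE_CHECKING, Any
--
-- def format_active_actions(actions: list[dict[str, Any]]) -> str:
--     """Format active actions for context (especially for action_coach persona).
--
--     Args:
--         actions: List of action dicts with title, status, priority, due dates
--
--     Returns:
--         Formatted actions context string
--     """
--     if not actions:
--         return ""
--
--     lines = [
--         "<active_actions>",
--         "The user's current action items:",
--     ]
--
--     # Group by status
--     in_progress = [a for a in actions if a.get("status") == "in_progress"]
--     todo = [a for a in actions if a.get("status") == "todo"]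
--     blocked = [a for a in actions if a.get("status") == "blocked"]
--
--     def format_action(action: dict[str, Any]) -> str:
--         title = action.get("title", "Untitled")
--         priority = action.get("priority", "medium")
--         due = action.get("target_end_date") or action.get("estimated_end_date")
--         due_str = f' due="{due}"' if due else ""
--         return f'    <action priority="{priority}"{due_str}>{title}</action>'
--
--     if in_progress:
--         lines.append("  <in_progress>")
--         lines.extend([format_action(a) for a in in_progress[:5]])
--         lines.append("  </in_progress>")
--
--     if todo:
--         lines.append("  <todo>")
--         lines.extend([format_action(a) for a in todo[:5]])
--         lines.append("  </todo>")
--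
--     if blocked:
--         lines.append("  <blocked>")
--         for a in blocked[:3]:
--             title = a.get("title", "Untitled")
--             reason = a.get("blocking_reason", "Unknown")
--             lines.append(f'    <action reason="{reason}">{title}</action>')
--         lines.append("  </blocked>")
--
--     lines.append("</active_actions>")
--     return "\n".join(lines)
-- ===== SOURCE B (Python) =====
-- def format_active_actions(actions: list) -> str:
--     """Sort-then-scan: stable-sort actions by status rank, then one run-boundary
--     scan emits sections, opening/closing tags when the rank changes."""
--     if not actions:
--         return ""
--
--     RANK = {"in_progress": 0, "todo": 1, "blocked": 2}
--     TAGS = ("in_progress", "todo", "blocked")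
--     CAPS = (5, 5, 3)
--
--     tagged = [(RANK[a.get("status")], a) for a in actions if a.get("status") in RANK]
--     tagged.sort(key=lambda p: p[0])  # stable: keeps encounter order within a rank
--
--     def render(r, a):
--         title = a.get("title", "Untitled")
--         if r == 2:
--             return '    <action reason="{}">{}</action>'.format(
--                 a.get("blocking_reason", "Unknown"), title)
--         due = a.get("target_end_date") or a.get("estimated_end_date")
--         due_str = ' due="{}"'.format(due) if due else ""
--         return '    <action priority="{}"{}>{}</action>'.format(
--             a.get("priority", "medium"), due_str, title)
--
--     lines = ["<active_actions>", "The user's current action items:"]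
--     prev = None
--     count = 0
--     for r, a in tagged:
--         if prev != r:
--             if prev is not None:
--                 lines.append("  </%s>" % TAGS[prev])
--             lines.append("  <%s>" % TAGS[r])
--             prev, count = r, 0
--         if count < CAPS[r]:
--             lines.append(render(r, a))
--             count += 1
--     if prev is not None:
--         lines.append("  </%s>" % TAGS[prev])
--     lines.append("</active_actions>")
--     return "\n".join(lines)
-- ===== Notes on version B (the rewrite author's own statement) =====
-- stated objective: alternative
-- what changed: Instead of three per-status filter passes each emitting its own section, B tags each action with a numeric status rank, stable-sorts by that rank, and a single run-boundary scan over the sorted list opens/closes section tags when the rank changes while a per-run counter enforces the 5/5/3 caps.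
import Mathlib
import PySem

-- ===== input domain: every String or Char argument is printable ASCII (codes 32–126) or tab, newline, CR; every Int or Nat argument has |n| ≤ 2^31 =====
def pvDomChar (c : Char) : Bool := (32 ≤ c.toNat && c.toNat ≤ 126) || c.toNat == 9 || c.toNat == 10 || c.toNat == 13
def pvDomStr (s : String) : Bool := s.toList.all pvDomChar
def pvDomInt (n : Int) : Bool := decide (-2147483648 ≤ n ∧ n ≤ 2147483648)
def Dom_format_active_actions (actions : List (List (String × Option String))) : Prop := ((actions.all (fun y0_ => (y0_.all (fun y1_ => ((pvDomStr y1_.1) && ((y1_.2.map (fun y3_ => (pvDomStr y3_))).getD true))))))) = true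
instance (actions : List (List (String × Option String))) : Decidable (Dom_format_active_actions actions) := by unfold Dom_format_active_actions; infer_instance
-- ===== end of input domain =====

-- B replaces A's three per-status filter passes by a stable sort on a numeric status
-- rank followed by one run-boundary scan that opens/closes section tags (alternative
-- decomposition, same observable output; no speed claim).

-- shared Python-dict-value semantics helpers (a dict value here is Option String; Python str(None) = "None",
-- and None/"" are falsy). Each action assoc list is read as a Python dict (PySem.Dict.ofList: last key wins).
def pyDictGet (a : List (String × Option String)) (k : String) (dflt : Option String) : Option String :=
  (PySem.Dict.ofList a).getD k dflt
def pyStr : Option String → String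
  | none => "None"
  | some s => s
def pyTruthy : Option String → Bool
  | none => false
  | some s => !(s == "")

-- ===== PORT A =====
def fmtActionA (a : List (String × Option String)) : String :=
  let title := pyStr (pyDictGet a "title" (some "Untitled"))
  let priority := pyStr (pyDictGet a "priority" (some "medium"))
  let due := let d1 := pyDictGet a "target_end_date" none
             if pyTruthy d1 then d1 else pyDictGet a "estimated_end_date" none
  let dueStr := if pyTruthy due then " due=\"" ++ pyStr due ++ "\"" else ""
  "    <action priority=\"" ++ priority ++ "\"" ++ dueStr ++ ">" ++ title ++ "</action>"

def fmtBlockedA (a : List (String × Option String)) : String :=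
  let title := pyStr (pyDictGet a "title" (some "Untitled"))
  let reason := pyStr (pyDictGet a "blocking_reason" (some "Unknown"))
  "    <action reason=\"" ++ reason ++ "\">" ++ title ++ "</action>"

-- xs[:5] / xs[:3] is List.take 5 / 3 (exact for a nonnegative literal bound); "if xs:" is xs ≠ [].
def format_active_actions (actions : List (List (String × Option String))) : String :=
  if actions = [] then "" else
  let lines := ["<active_actions>", "The user's current action items:"]
  let in_progress := actions.filter (fun a => pyDictGet a "status" none == some "in_progress")
  let todo := actions.filter (fun a => pyDictGet a "status" none == some "todo")
  let blocked := actions.filter (fun a => pyDictGet a "status" none == some "blocked")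
  let lines := if in_progress = [] then lines else
    lines ++ ["  <in_progress>"] ++ (in_progress.take 5).map fmtActionA ++ ["  </in_progress>"]
  let lines := if todo = [] then lines else
    lines ++ ["  <todo>"] ++ (todo.take 5).map fmtActionA ++ ["  </todo>"]
  let lines := if blocked = [] then lines else
    lines ++ ["  <blocked>"] ++ (blocked.take 3).map fmtBlockedA ++ ["  </blocked>"]
  PySem.Str.join "\n" (lines ++ ["</active_actions>"])

-- ===== PORT B =====
-- RANK[a.get("status")] guarded by "in RANK": a partial rank lookup
def rankOf (s : Option String) : Option Nat :=
  if s == some "in_progress" then some 0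
  else if s == some "todo" then some 1
  else if s == some "blocked" then some 2
  else none

def tagName (r : Nat) : String := if r = 0 then "in_progress" else if r = 1 then "todo" else "blocked"
def capOf (r : Nat) : Nat := if r = 2 then 3 else 5

def renderB (r : Nat) (a : List (String × Option String)) : String :=
  let title := pyStr (pyDictGet a "title" (some "Untitled"))
  if r = 2 then
    "    <action reason=\"" ++ pyStr (pyDictGet a "blocking_reason" (some "Unknown")) ++ "\">" ++ title ++ "</action>"
  else
    let due := let d1 := pyDictGet a "target_end_date" none
               if pyTruthy d1 then d1 else pyDictGet a "estimated_end_date" none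
    let dueStr := if pyTruthy due then " due=\"" ++ pyStr due ++ "\"" else ""
    "    <action priority=\"" ++ pyStr (pyDictGet a "priority" (some "medium")) ++ "\"" ++ dueStr ++ ">" ++ title ++ "</action>"

-- "if prev is not None: lines.append('  </%s>' % TAGS[prev])"
def closeLines (prev : Option Nat) (lines : List String) : List String :=
  match prev with
  | none => lines
  | some q => lines ++ ["  </" ++ tagName q ++ ">"]

-- the body of B's for-loop over the sorted tagged list, state = (prev, count, lines)
def scanStep (st : Option Nat × Nat × List String) (p : Nat × List (String × Option String)) :
    Option Nat × Nat × List String :=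
  let st := if st.1 ≠ some p.1 then
      (some p.1, 0, closeLines st.1 st.2.2 ++ ["  <" ++ tagName p.1 ++ ">"])
    else st
  if st.2.1 < capOf p.1 then (st.1, st.2.1 + 1, st.2.2 ++ [renderB p.1 p.2]) else st

def format_active_actions_alt (actions : List (List (String × Option String))) : String :=
  if actions = [] then "" else
  let tagged := actions.filterMap (fun a => (rankOf (pyDictGet a "status" none)).map (fun r => (r, a)))
  let tagged := PySem.List.sorted tagged (fun p => p.1)   -- tagged.sort(key=lambda p: p[0]): stable
  let st := tagged.foldl scanStep (none, 0, ["<active_actions>", "The user's current action items:"])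
  PySem.Str.join "\n" (closeLines st.1 st.2.2 ++ ["</active_actions>"])

-- ===== PRECONDITION & SPEC =====
def Spec_format_active_actions (actions : List (List (String × Option String))) (out : String) : Prop := out = format_active_actions_alt actions
instance (actions : List (List (String × Option String))) (out : String) : Decidable (Spec_format_active_actions actions out) := by unfold Spec_format_active_actions; infer_instance

-- ===== CLAIM (what is proved, stated in full; the proofs are below) =====
def Claim_equal_format_active_actions : Prop := ∀ (actions : List (List (String × Option String))), Dom_format_active_actions actions → Spec_format_active_actions actions (format_active_actions actions)

-- ===== LEMMAS AND PROOFS =====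

theorem renderB_zero : renderB 0 = fmtActionA := by funext a; rfl
theorem renderB_one : renderB 1 = fmtActionA := by funext a; rfl
theorem renderB_two : renderB 2 = fmtBlockedA := by funext a; rfl

-- the rank table characterised pointwise
theorem rankOf_eq_zero (s : Option String) : rankOf s = some 0 ↔ s = some "in_progress" := by
  unfold rankOf; split_ifs <;> simp_all
theorem rankOf_eq_one (s : Option String) : rankOf s = some 1 ↔ s = some "todo" := by
  unfold rankOf; split_ifs <;> simp_all
theorem rankOf_eq_two (s : Option String) : rankOf s = some 2 ↔ s = some "blocked" := by
  unfold rankOf; split_ifs <;> simp_all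
theorem rankOf_le_two (s : Option String) (r : Nat) (h : rankOf s = some r) : r ≤ 2 := by
  unfold rankOf at h; split_ifs at h <;> simp_all <;> omega

-- slicing the tagged list at a rank recovers A's status filter
theorem tagged_filter (i : Nat) (t : String)
    (hiff : ∀ s, rankOf s = some i ↔ s = some t)
    (l : List (List (String × Option String))) :
    (l.filterMap (fun a => (rankOf (pyDictGet a "status" none)).map (fun r => (r, a)))).filter
        (fun p => p.1 == i)
      = (l.filter (fun a => pyDictGet a "status" none == some t)).map (fun a => (i, a)) := by
  induction l with
  | nil => rfl
  | cons a l ih =>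
    simp only [List.filterMap_cons, List.filter_cons]
    cases h : rankOf (pyDictGet a "status" none) with
    | none =>
      have : ¬ pyDictGet a "status" none = some t := by
        intro hs; rw [← hiff] at hs; simp [h] at hs
      simp [this, ih]
    | some r =>
      by_cases hr : r = i
      · subst hr
        have : pyDictGet a "status" none = some t := (hiff _).mp h
        simp [this, ih]
      · have : ¬ pyDictGet a "status" none = some t := by
          intro hs; rw [← hiff] at hs; rw [h] at hs; exact hr (by injection hs)
        simp [this, hr, ih]

-- insertBy skips a prefix it is not 'before'
theorem insertBy_prefix {α : Type} (before : α → α → Bool) (x : α) (p s : List α)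
    (h : ∀ y ∈ p, before x y = false) :
    PySem.List.insertBy before x (p ++ s) = p ++ PySem.List.insertBy before x s := by
  induction p with
  | nil => rfl
  | cons y p ih =>
    have hy : before x y = false := h y (by simp)
    simp only [List.cons_append, PySem.List.insertBy, hy]
    rw [ih (fun z hz => h z (by simp [hz]))]
    simp

theorem insertBy_of_forall_before {α : Type} (before : α → α → Bool) (x : α) (s : List α)
    (h : ∀ y ∈ s, before x y = true) :
    PySem.List.insertBy before x s = x :: s := by
  cases s with
  | nil => rfl
  | cons y ys => simp [PySem.List.insertBy, h y (by simp)]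

-- the stable insertion sort over ranks 0/1/2 is the concatenation of the three rank slices
theorem foldl_insert_ranks {α : Type} :
    ∀ (l g0 g1 g2 : List (Nat × α)), (∀ p ∈ l, p.1 ≤ 2) →
     (∀ p ∈ g0, p.1 = 0) → (∀ p ∈ g1, p.1 = 1) → (∀ p ∈ g2, p.1 = 2) →
      l.foldl (fun acc x => PySem.List.insertBy (fun a b => decide (a.1 < b.1)) x acc)
          (g0 ++ g1 ++ g2)
        = (g0 ++ l.filter (fun p => p.1 == 0)) ++ (g1 ++ l.filter (fun p => p.1 == 1))
            ++ (g2 ++ l.filter (fun p => p.1 == 2)) := by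
  intro l
  induction l with
  | nil => intro g0 g1 g2 _ _ _ _; simp
  | cons x t ih =>
    intro g0 g1 g2 hl h0 h1 h2
    have hx : x.1 ≤ 2 := hl x (by simp)
    have ht : ∀ p ∈ t, p.1 ≤ 2 := fun p hp => hl p (by simp [hp])
    simp only [List.foldl_cons]
    interval_cases hxr : x.1
    · -- rank 0: insert at the end of g0
      have step : PySem.List.insertBy (fun a b => decide (a.1 < b.1)) x (g0 ++ g1 ++ g2)
          = (g0 ++ [x]) ++ g1 ++ g2 := by
        rw [List.append_assoc, insertBy_prefix _ _ g0 (g1 ++ g2)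
          (fun y hy => by simp [h0 y hy, hxr])]
        rw [insertBy_of_forall_before _ _ _ (fun y hy => by
          rcases List.mem_append.mp hy with hy | hy
          · simp [h1 y hy, hxr]
          · simp [h2 y hy, hxr])]
        simp
      rw [step, ih (g0 ++ [x]) g1 g2 ht
        (fun p hp => by rcases List.mem_append.mp hp with hp | hp
                        · exact h0 p hp
                        · simp at hp; simp [hp, hxr]) h1 h2]
      simp [hxr]
    · -- rank 1: insert at the end of g1
      have step : PySem.List.insertBy (fun a b => decide (a.1 < b.1)) x (g0 ++ g1 ++ g2)
          = g0 ++ (g1 ++ [x]) ++ g2 := by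
        rw [insertBy_prefix _ _ (g0 ++ g1) g2 (fun y hy => by
          rcases List.mem_append.mp hy with hy | hy
          · simp [h0 y hy, hxr]
          · simp [h1 y hy, hxr])]
        rw [insertBy_of_forall_before _ _ _ (fun y hy => by simp [h2 y hy, hxr])]
        simp
      rw [step, ih g0 (g1 ++ [x]) g2 ht h0
        (fun p hp => by rcases List.mem_append.mp hp with hp | hp
                        · exact h1 p hp
                        · simp at hp; simp [hp, hxr]) h2]
      simp [hxr]
    · -- rank 2: insert at the very end
      have step : PySem.List.insertBy (fun a b => decide (a.1 < b.1)) x (g0 ++ g1 ++ g2)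
          = g0 ++ g1 ++ (g2 ++ [x]) := by
        rw [PySem.List.insertBy_of_forall_not_before _ _ _ (fun y hy => by
          rcases List.mem_append.mp hy with hy | hy
          · rcases List.mem_append.mp hy with hy | hy
            · simp [h0 y hy, hxr]
            · simp [h1 y hy, hxr]
          · simp [h2 y hy, hxr])]
        simp
      rw [step, ih g0 g1 (g2 ++ [x]) ht h0 h1
        (fun p hp => by rcases List.mem_append.mp hp with hp | hp
                        · exact h2 p hp
                        · simp at hp; simp [hp, hxr])]
      simp [hxr]

theorem capOf_pos (r : Nat) : 0 < capOf r := by unfold capOf; split <;> norm_num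

-- scanning a run of equal rank past the boundary only appends capped renders
theorem scan_items (r : Nat) :
    ∀ (blk : List (Nat × List (String × Option String))), (∀ p ∈ blk, p.1 = r) →
    ∀ (c : Nat), c ≤ capOf r → ∀ (lines : List String),
      blk.foldl scanStep (some r, c, lines)
        = (some r, min (capOf r) (c + blk.length),
            lines ++ (blk.take (capOf r - c)).map (fun p => renderB r p.2)) := by
  intro blk
  induction blk with
  | nil => intro _ c hc lines; simp [Nat.min_eq_right hc]
  | cons p t ih =>
    intro hblk c hc lines
    have hp : p.1 = r := hblk p (by simp)
    have ht : ∀ q ∈ t, q.1 = r := fun q hq => hblk q (by simp [hq])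
    simp only [List.foldl_cons]
    by_cases hcc : c < capOf r
    · have hstep : scanStep (some r, c, lines) p
          = (some r, c + 1, lines ++ [renderB r p.2]) := by
        simp [scanStep, hp, hcc]
      rw [hstep, ih ht (c + 1) (by omega) _]
      have hco : capOf r - c = (capOf r - (c + 1)) + 1 := by omega
      rw [hco]
      simp only [Prod.mk.injEq, List.take_succ_cons, List.map_cons, List.length_cons]
      refine ⟨trivial, by omega, by simp⟩
    · have hce : c = capOf r := by omega
      have hstep : scanStep (some r, c, lines) p = (some r, c, lines) := by
        simp [scanStep, hp, hcc]
      rw [hstep, ih ht c hc lines]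
      simp only [Prod.mk.injEq, List.length_cons]
      refine ⟨trivial, by omega, by simp [hce]⟩

-- scanning one whole nonempty run: close the previous section, open this one, render the cap
theorem scan_block (r : Nat) (blk : List (Nat × List (String × Option String)))
    (hne : blk ≠ []) (hblk : ∀ p ∈ blk, p.1 = r)
    (prev : Option Nat) (hprev : prev ≠ some r) (c : Nat) (lines : List String) :
    blk.foldl scanStep (prev, c, lines)
      = (some r, min (capOf r) blk.length,
          closeLines prev lines ++ ["  <" ++ tagName r ++ ">"]
            ++ (blk.take (capOf r)).map (fun p => renderB r p.2)) := by
  cases blk with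
  | nil => exact absurd rfl hne
  | cons p t =>
    have hp : p.1 = r := hblk p (by simp)
    have ht : ∀ q ∈ t, q.1 = r := fun q hq => hblk q (by simp [hq])
    simp only [List.foldl_cons]
    have hstep : scanStep (prev, c, lines) p
        = (some r, 1, (closeLines prev lines ++ ["  <" ++ tagName r ++ ">"]) ++ [renderB r p.2]) := by
      simp [scanStep, hp, hprev, capOf_pos r]
    rw [hstep, scan_items r t ht 1 (capOf_pos r) _]
    rw [List.take_cons (capOf_pos r)]
    simp only [Prod.mk.injEq, List.length_cons, List.map_cons]
    refine ⟨trivial, by omega, by simp⟩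

-- ===== VERDICT (by name: the statement is the Claim_ definition above) =====
theorem format_active_actions_spec : Claim_equal_format_active_actions := by
  intro actions _
  unfold Spec_format_active_actions format_active_actions format_active_actions_alt
  by_cases ha : actions = []
  · simp [ha]
  · simp only [ha, ite_false]
    set F0 := actions.filter (fun a => pyDictGet a "status" none == some "in_progress") with hF0
    set F1 := actions.filter (fun a => pyDictGet a "status" none == some "todo") with hF1
    set F2 := actions.filter (fun a => pyDictGet a "status" none == some "blocked") with hF2
    set tg := actions.filterMap (fun a => (rankOf (pyDictGet a "status" none)).map (fun r => (r, a))) with htg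
    have htg2 : ∀ p ∈ tg, p.1 ≤ 2 := by
      intro p hp
      rw [htg, List.mem_filterMap] at hp
      obtain ⟨a, _, hpa⟩ := hp
      cases h : rankOf (pyDictGet a "status" none) with
      | none => simp [h] at hpa
      | some r =>
        rw [h] at hpa
        simp only [Option.map_some, Option.some.injEq] at hpa
        rw [← hpa]
        exact rankOf_le_two _ r h
    have hsort : PySem.List.sorted tg (fun p => p.1)
        = F0.map (fun a => (0, a)) ++ F1.map (fun a => (1, a)) ++ F2.map (fun a => (2, a)) := by
      rw [PySem.List.sorted_eq_foldl_insertBy]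
      have := foldl_insert_ranks tg [] [] [] htg2 (by simp) (by simp) (by simp)
      simp only [List.nil_append] at this
      rw [this, htg,
        tagged_filter 0 "in_progress" rankOf_eq_zero,
        tagged_filter 1 "todo" rankOf_eq_one,
        tagged_filter 2 "blocked" rankOf_eq_two]
    rw [hsort]
    simp only [List.foldl_append]
    by_cases h0 : F0 = [] <;> by_cases h1 : F1 = [] <;> by_cases h2 : F2 = [] <;>
      simp only [h0, h1, h2, List.map_nil, List.foldl_nil, if_true, if_false]
    · simp [closeLines]
    · rw [scan_block 2 _ (by simpa using h2) (by simp) none (by simp) _ _]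
      simp [closeLines, capOf, tagName, renderB_two,
        List.map_map, Function.comp_def, List.append_assoc]
    · rw [scan_block 1 _ (by simpa using h1) (by simp) none (by simp) _ _]
      simp [closeLines, capOf, tagName, renderB_one,
        List.map_map, Function.comp_def, List.append_assoc]
    · rw [scan_block 1 _ (by simpa using h1) (by simp) none (by simp) _ _,
          scan_block 2 _ (by simpa using h2) (by simp) (some 1) (by simp) _ _]
      simp [closeLines, capOf, tagName, renderB_one, renderB_two,
        List.map_map, Function.comp_def, List.append_assoc]
    · rw [scan_block 0 _ (by simpa using h0) (by simp) none (by simp) _ _]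
      simp [closeLines, capOf, tagName, renderB_zero,
        List.map_map, Function.comp_def, List.append_assoc]
    · rw [scan_block 0 _ (by simpa using h0) (by simp) none (by simp) _ _,
          scan_block 2 _ (by simpa using h2) (by simp) (some 0) (by simp) _ _]
      simp [closeLines, capOf, tagName, renderB_zero, renderB_two,
        List.map_map, Function.comp_def, List.append_assoc]
    · rw [scan_block 0 _ (by simpa using h0) (by simp) none (by simp) _ _,
          scan_block 1 _ (by simpa using h1) (by simp) (some 0) (by simp) _ _]
      simp [closeLines, capOf, tagName, renderB_zero, renderB_one,
        List.map_map, Function.comp_def, List.append_assoc]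
    · rw [scan_block 0 _ (by simpa using h0) (by simp) none (by simp) _ _,
          scan_block 1 _ (by simpa using h1) (by simp) (some 0) (by simp) _ _,
          scan_block 2 _ (by simpa using h2) (by simp) (some 1) (by simp) _ _]
      simp [closeLines, capOf, tagName, renderB_zero, renderB_one, renderB_two,
        List.map_map, Function.comp_def, List.append_assoc]
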